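-- pv_equiv track=rewrite | github.com/in40/ai-agent | core/prompts/sql_generator_model.py | format_database_mapping
-- ===== SOURCE A (Python) =====
-- def format_database_mapping(table_to_db_mapping, table_to_real_db_mapping=None):
--     """
--     Format the table-to-database mapping into a readable string for the LLM
--     """
--     if not table_to_db_mapping:
--         return ""
--
--     # Group tables by database for better organization
--     db_to_tables = {}
--     for table_name, db_name in table_to_db_mapping.items():
--         if db_name not in db_to_tables:
--             db_to_tables[db_name] = []
--         db_to_tables[db_name].append(table_name)
--
--     formatted = "\nDatabase mapping information:\n"
--     for db_name, tables in db_to_tables.items():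
--         # Use real database name if available, otherwise use the alias
--         display_name = db_name
--         if table_to_real_db_mapping:
--             for table_name, real_db_name in table_to_real_db_mapping.items():
--                 if table_name in tables:
--                     display_name = real_db_name
--                     break
--
--         formatted += f"\nDatabase '{display_name}' contains tables: {', '.join(tables)}\n"
--
--         # Add a note about which columns exist in which databases if needed
--         # This is handled in the schema formatting below
--
--     return formatted
-- ===== SOURCE B (Python) =====
-- def format_database_mapping(table_to_db_mapping, table_to_real_db_mapping=None):
--     """
--     Format the table-to-database mapping into a readable string for the LLM
--     """
--     if not table_to_db_mapping:
--         return ""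
--
--     items = list(table_to_db_mapping.items())
--     # distinct database names, in first-occurrence order (no dict-of-lists grouping)
--     dbs = list(dict.fromkeys(db for _, db in items))
--
--     # one indexed pass over the real-db mapping: per database alias, the real
--     # name attached to the FIRST of its tables appearing in the real mapping
--     display = {}
--     if table_to_real_db_mapping:
--         for table_name, real_db_name in table_to_real_db_mapping.items():
--             db = table_to_db_mapping.get(table_name)
--             if db is not None and db not in display:
--                 display[db] = real_db_name
--
--     lines = [
--         "\nDatabase '{}' contains tables: {}\n".format(
--             display.get(db, db),
--             ", ".join(t for t, d in items if d == db),
--         )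
--         for db in dbs
--     ]
--     return "\nDatabase mapping information:\n" + "".join(lines)
-- ===== Notes on version B (the rewrite author's own statement) =====
-- stated objective: alternative
-- what changed: Drops A's dict-of-lists grouping and its per-database rescan of the real-db mapping: B lists the distinct databases with dict.fromkeys, picks each group by a filter over the items, and resolves display names in one indexed pass keyed by database, then joins a list comprehension.
import Mathlib
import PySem

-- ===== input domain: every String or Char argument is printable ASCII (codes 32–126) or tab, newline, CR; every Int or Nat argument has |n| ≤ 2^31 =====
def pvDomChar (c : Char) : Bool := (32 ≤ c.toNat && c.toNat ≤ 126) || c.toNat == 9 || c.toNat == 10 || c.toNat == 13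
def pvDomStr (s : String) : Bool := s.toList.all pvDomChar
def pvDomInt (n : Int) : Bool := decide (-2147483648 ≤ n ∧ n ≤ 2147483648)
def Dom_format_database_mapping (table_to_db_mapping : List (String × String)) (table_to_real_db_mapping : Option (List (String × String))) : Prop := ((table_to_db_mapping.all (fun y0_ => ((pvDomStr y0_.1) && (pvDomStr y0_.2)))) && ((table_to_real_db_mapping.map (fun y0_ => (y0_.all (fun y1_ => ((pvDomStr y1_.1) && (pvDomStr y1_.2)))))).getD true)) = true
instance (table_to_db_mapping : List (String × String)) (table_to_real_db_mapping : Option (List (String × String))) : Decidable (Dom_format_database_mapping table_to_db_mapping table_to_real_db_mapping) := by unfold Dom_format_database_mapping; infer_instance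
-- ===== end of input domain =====

-- B drops A's dict-of-lists grouping: distinct dbs + per-db filter + one indexed display pass (objective: alternative).


-- ===== PORT A =====
def format_database_mapping (table_to_db_mapping : List (String × String)) (table_to_real_db_mapping : Option (List (String × String))) : String :=
  if table_to_db_mapping = [] then "" else
  -- 'for table_name, db_name in table_to_db_mapping.items()' — iterate the dict built from the pairs
  let items := (PySem.Dict.ofList table_to_db_mapping).items
  -- if db_name not in db_to_tables: db_to_tables[db_name] = [];  db_to_tables[db_name].append(table_name)
  let dbToTables := items.foldl (fun d p => d.modify p.2 [] (· ++ [p.1])) PySem.Dict.empty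
  -- 'if table_to_real_db_mapping:' — falsy for None and for the empty dict
  let rItems := match table_to_real_db_mapping with
    | none => ([] : List (String × String))
    | some r => (PySem.Dict.ofList r).items
  dbToTables.items.foldl (fun acc p =>
    -- inner scan with break: first (table_name, real_db_name) whose table is in this group
    let display :=
      if rItems = [] then p.1
      else
        match rItems.find? (fun q => decide (q.1 ∈ p.2)) with
        | some q => q.2
        | none => p.1
    acc ++ "\nDatabase '" ++ display ++ "' contains tables: " ++ PySem.Str.join ", " p.2 ++ "\n")
    "\nDatabase mapping information:\n"


-- ===== PORT B =====
def format_database_mapping_alt (table_to_db_mapping : List (String × String)) (table_to_real_db_mapping : Option (List (String × String))) : String :=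
  if table_to_db_mapping = [] then "" else
  let tdict := PySem.Dict.ofList table_to_db_mapping
  let items := tdict.items
  -- dbs = list(dict.fromkeys(db for _, db in items)) — distinct dbs, first-occurrence order
  let dbs : PySem.Set String := PySem.Set.ofList (items.map (·.2))
  let rItems := match table_to_real_db_mapping with
    | none => ([] : List (String × String))
    | some r => (PySem.Dict.ofList r).items
  -- one indexed pass: display[db] = real name of the first table of db occurring in the real mapping
  let display := rItems.foldl (fun disp q =>
      match tdict.get? q.1 with
      | some db => if disp.contains db then disp else disp.insert db q.2
      | none => disp) (PySem.Dict.empty : PySem.Dict String String)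
  -- lines = [f"..." for db in dbs] with a filter picking db's tables from items
  let lines := dbs.map (fun db =>
      "\nDatabase '" ++ display.getD db db ++ "' contains tables: " ++
        PySem.Str.join ", " ((items.filter (fun p => p.2 == db)).map (·.1)) ++ "\n")
  "\nDatabase mapping information:\n" ++ PySem.Str.join "" lines


-- ===== PRECONDITION & SPEC =====
def Spec_format_database_mapping (table_to_db_mapping : List (String × String)) (table_to_real_db_mapping : Option (List (String × String))) (out : String) : Prop := out = format_database_mapping_alt table_to_db_mapping table_to_real_db_mapping
instance (table_to_db_mapping : List (String × String)) (table_to_real_db_mapping : Option (List (String × String))) (out : String) : Decidable (Spec_format_database_mapping table_to_db_mapping table_to_real_db_mapping out) := by unfold Spec_format_database_mapping; infer_instance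

-- ===== CLAIM (what is proved, stated in full; the proofs are below) =====
def Claim_equal_format_database_mapping : Prop := ∀ (table_to_db_mapping : List (String × String)) (table_to_real_db_mapping : Option (List (String × String))), Dom_format_database_mapping table_to_db_mapping table_to_real_db_mapping → Spec_format_database_mapping table_to_db_mapping table_to_real_db_mapping (format_database_mapping table_to_db_mapping table_to_real_db_mapping)

-- ===== LEMMAS AND PROOFS =====

-- `join "" (x :: l)` peels off the first part
theorem pv_join_empty_cons (x : String) (l : List String) :
    PySem.Str.join "" (x :: l) = x ++ PySem.Str.join "" l := by
  apply String.toList_inj.mp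
  simp only [PySem.Str.join, String.toList_empty, List.map_cons, String.toList_ofList,
    String.toList_append]
  cases l <;> simp [PySem.Chars.join_cons_cons, PySem.Chars.join_nil, PySem.Chars.join_singleton]

-- the tables A's grouping loop records for db are exactly B's filter
theorem pv_group_getD (L : List (String × String)) (db : String) :
    (L.foldl (fun d (p : String × String) => d.modify p.2 [] (· ++ [p.1])) PySem.Dict.empty).getD db []
      = (L.filter (fun p => p.2 == db)).map (·.1) := by
  have h : L.foldl (fun d (p : String × String) => d.modify p.2 [] (· ++ [p.1])) PySem.Dict.empty
      = (L.map Prod.swap).foldl (fun d (p : String × String) => d.modify p.1 [] (· ++ [p.2])) PySem.Dict.empty := by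
    rw [List.foldl_map]; rfl
  rw [h, PySem.Dict.getD_foldl_modify_append]
  simp [List.filter_map, List.map_map, Function.comp_def]

-- keys of the grouping dict are unique
theorem pv_group_nodup (L : List (String × String)) :
    (L.foldl (fun d (p : String × String) => d.modify p.2 [] (· ++ [p.1])) PySem.Dict.empty).keys.Nodup :=
  PySem.Dict.nodup_keys_foldl_modify_key L (·.2) [] (fun _ p => (· ++ [p.1])) PySem.Dict.empty
    PySem.Dict.nodup_keys_empty

-- A's group items are B's (db, filter) pairs over the distinct dbs, in order
theorem pv_group_items (L : List (String × String)) :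
    (L.foldl (fun d (p : String × String) => d.modify p.2 [] (· ++ [p.1])) PySem.Dict.empty).items
      = (PySem.Set.ofList (L.map (·.2))).map
          (fun db => (db, ((L.filter (fun p => p.2 == db)).map (·.1)))) := by
  rw [PySem.Dict.items_eq_map_keys _ (pv_group_nodup L) []]
  have hkeys : (L.foldl (fun d (p : String × String) => d.modify p.2 [] (· ++ [p.1])) PySem.Dict.empty).keys
      = PySem.Set.ofList (L.map (·.2)) := by
    rw [PySem.Dict.keys_foldl_modify_key L (·.2) [] (fun _ p => (· ++ [p.1]))]
    simp [PySem.Set.update, PySem.Set.ofList_eq_foldl]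
  rw [hkeys]
  exact List.map_congr_left (fun db _ => by rw [pv_group_getD])

-- membership in db's filtered table list = the dict maps the table to db
theorem pv_mem_filter_iff (m : List (String × String)) (db t : String) :
    t ∈ (((PySem.Dict.ofList m).items.filter (fun p => p.2 == db)).map (·.1))
      ↔ (PySem.Dict.ofList m).get? t = some db := by
  rw [PySem.Dict.get?_eq_some_iff_mem_items _ _ _ (PySem.Dict.nodup_keys_ofList m)]
  simp only [List.mem_map, List.mem_filter, beq_iff_eq]
  constructor
  · rintro ⟨p, ⟨hp, hdb⟩, ht⟩
    have : p = (t, db) := by cases p; simp_all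
    exact this ▸ hp
  · intro h
    exact ⟨(t, db), ⟨h, rfl⟩, rfl⟩

-- the one-pass display loop: per database, get? returns the FIRST matching real name
theorem pv_display_get? (td : PySem.Dict String String) (rl : List (String × String))
    (disp : PySem.Dict String String) (db : String) :
    (rl.foldl (fun disp q =>
        match td.get? q.1 with
        | some d' => if disp.contains d' then disp else disp.insert d' q.2
        | none => disp) disp).get? db
      = (disp.get? db).or ((rl.find? (fun q => td.get? q.1 == some db)).map (·.2)) := by
  induction rl generalizing disp with
  | nil => simp
  | cons q rl ih =>
    simp only [List.foldl_cons]
    cases hq : td.get? q.1 with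
    | none =>
      dsimp only
      rw [ih, List.find?_cons_of_neg (by simp [hq])]
    | some d' =>
      dsimp only
      by_cases hdb : d' = db
      · subst hdb
        by_cases hc : disp.contains d' = true
        · rw [if_pos hc, ih]
          have hs : (disp.get? d').isSome := by
            rw [← PySem.Dict.contains_eq_isSome_get?]; exact hc
          obtain ⟨v, hv⟩ := Option.isSome_iff_exists.mp hs
          rw [List.find?_cons_of_pos (by simp [hq])]
          simp [hv]
        · rw [if_neg hc, ih, PySem.Dict.get?_insert_self]
          have hn : disp.get? d' = none := by
            cases h : disp.get? d' with
            | none => rfl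
            | some v => exact absurd (by rw [PySem.Dict.contains_eq_isSome_get?, h]; rfl) hc
          rw [List.find?_cons_of_pos (by simp [hq])]
          simp [hn]
      · have step : (if disp.contains d' then disp else disp.insert d' q.2).get? db = disp.get? db := by
          split
          · rfl
          · exact PySem.Dict.get?_insert_of_ne _ _ (Ne.symm hdb)
        rw [ih, step, List.find?_cons_of_neg (by simp [hq, hdb])]

-- per-database display-name agreement between A's rescan-with-break and B's indexed dict
theorem pv_display_eq (m : List (String × String)) (rl : List (String × String)) (db : String) :
    (if rl = [] then db
     else
       match rl.find? (fun q => decide (q.1 ∈ (((PySem.Dict.ofList m).items.filter (fun p => p.2 == db)).map (·.1)))) with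
       | some q => q.2
       | none => db)
    = (rl.foldl (fun disp q =>
        match (PySem.Dict.ofList m).get? q.1 with
        | some d' => if disp.contains d' then disp else disp.insert d' q.2
        | none => disp) PySem.Dict.empty).getD db db := by
  have hpred : (fun q : String × String => decide (q.1 ∈ (((PySem.Dict.ofList m).items.filter (fun p => p.2 == db)).map (·.1))))
      = (fun q : String × String => (PySem.Dict.ofList m).get? q.1 == some db) := by
    funext q
    simp only [pv_mem_filter_iff m db q.1]
    exact Eq.symm (Bool.beq_eq_decide_eq _ _)
  rw [PySem.Dict.getD_eq_get?_getD, pv_display_get?, PySem.Dict.get?_empty, Option.none_or, hpred]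
  cases hrl : rl with
  | nil => simp
  | cons a l =>
    simp only [if_neg (by simp : ¬(a :: l = []))]
    cases (a :: l).find? (fun q => (PySem.Dict.ofList m).get? q.1 == some db) <;> simp

-- the whole body: A's fold over (db, tables) pairs = header ++ join of B's lines
theorem pv_body (m rl : List (String × String)) (dbs : List String) (init : String) :
    (dbs.map (fun db => (db, (((PySem.Dict.ofList m).items.filter (fun p => p.2 == db)).map (·.1))))).foldl
      (fun acc p =>
        let display :=
          if rl = [] then p.1
          else
            match rl.find? (fun q => decide (q.1 ∈ p.2)) with
            | some q => q.2
            | none => p.1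
        acc ++ "\nDatabase '" ++ display ++ "' contains tables: " ++ PySem.Str.join ", " p.2 ++ "\n") init
    = init ++ PySem.Str.join "" (dbs.map (fun db =>
        "\nDatabase '" ++
          (rl.foldl (fun disp q =>
              match (PySem.Dict.ofList m).get? q.1 with
              | some d' => if disp.contains d' then disp else disp.insert d' q.2
              | none => disp) PySem.Dict.empty).getD db db ++
          "' contains tables: " ++
          PySem.Str.join ", " (((PySem.Dict.ofList m).items.filter (fun p => p.2 == db)).map (·.1)) ++ "\n")) := by
  induction dbs generalizing init with
  | nil => simp [PySem.Str.join, PySem.Chars.join_nil]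
  | cons db dbs ih =>
    simp only [List.map_cons, List.foldl_cons, pv_join_empty_cons, ih]
    rw [← pv_display_eq m rl db]
    simp [String.append_assoc]

-- ===== VERDICT (by name: the statement is the Claim_ definition above) =====
theorem format_database_mapping_spec : Claim_equal_format_database_mapping := by
  intro m r _
  unfold Spec_format_database_mapping format_database_mapping format_database_mapping_alt
  by_cases hm : m = []
  · simp [hm]
  · simp only [if_neg hm]
    cases r with
    | none => rw [pv_group_items]; exact pv_body m [] _ _
    | some rr => rw [pv_group_items]; exact pv_body m ((PySem.Dict.ofList rr).items) _ _
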